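-- pv_equiv track=rewrite | github.com/Chase295/pump-platform | backend/modules/training/features.py | get_engineered_feature_names
-- ===== SOURCE A (Python) =====
-- from typing import List, Optional, Dict, Any
--
-- def get_engineered_feature_names(window_sizes: List[int] = None) -> List[str]:
--     """Return all possible engineered feature names for the given window sizes."""
--     if window_sizes is None:
--         window_sizes = [5, 10, 15]
--
--     features: List[str] = []
--     features.extend(['dev_sold_flag', 'dev_sold_cumsum'])
--     for w in window_sizes:
--         features.append(f'dev_sold_spike_{w}')
--     for w in window_sizes:
--         features.extend([f'buy_pressure_ma_{w}', f'buy_pressure_trend_{w}'])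
--     features.append('whale_net_volume')
--     for w in window_sizes:
--         features.append(f'whale_activity_{w}')
--     for w in window_sizes:
--         features.extend([f'volatility_ma_{w}', f'volatility_spike_{w}'])
--     for w in window_sizes:
--         features.append(f'wash_trading_flag_{w}')
--     for w in window_sizes:
--         features.extend([f'net_volume_ma_{w}', f'volume_flip_{w}'])
--     for w in window_sizes:
--         features.extend([f'price_change_{w}', f'price_roc_{w}'])
--     for w in window_sizes:
--         features.append(f'mcap_velocity_{w}')
--     # ATH features
--     for w in window_sizes:
--         features.extend([
--             f'ath_distance_trend_{w}', f'ath_approach_{w}', f'ath_breakout_count_{w}',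
--             f'ath_breakout_volume_ma_{w}', f'ath_age_trend_{w}',
--         ])
--     # ATH non-windowed features
--     features.extend(['rolling_ath', 'price_vs_ath_pct', 'ath_breakout', 'minutes_since_ath'])
--     # Power features
--     features.extend(['buy_sell_ratio', 'whale_dominance'])
--     for w in window_sizes:
--         features.extend([f'price_acceleration_{w}', f'volume_spike_{w}'])
--     return features
-- ===== SOURCE B (Python) =====
-- from typing import List, Optional, Dict, Any
--
-- # Ordered schema: each segment is either a static block of names or a block of
-- # per-window name prefixes expanded over every window size.
-- _SCHEMA = [
--     ("static", ['dev_sold_flag', 'dev_sold_cumsum']),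
--     ("win", ['dev_sold_spike_']),
--     ("win", ['buy_pressure_ma_', 'buy_pressure_trend_']),
--     ("static", ['whale_net_volume']),
--     ("win", ['whale_activity_']),
--     ("win", ['volatility_ma_', 'volatility_spike_']),
--     ("win", ['wash_trading_flag_']),
--     ("win", ['net_volume_ma_', 'volume_flip_']),
--     ("win", ['price_change_', 'price_roc_']),
--     ("win", ['mcap_velocity_']),
--     ("win", ['ath_distance_trend_', 'ath_approach_', 'ath_breakout_count_',
--              'ath_breakout_volume_ma_', 'ath_age_trend_']),
--     ("static", ['rolling_ath', 'price_vs_ath_pct', 'ath_breakout', 'minutes_since_ath',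
--                 'buy_sell_ratio', 'whale_dominance']),
--     ("win", ['price_acceleration_', 'volume_spike_']),
-- ]
--
-- def get_engineered_feature_names(window_sizes: List[int] = None) -> List[str]:
--     ws = [5, 10, 15] if window_sizes is None else window_sizes
--     out: List[str] = []
--     for kind, names in _SCHEMA:
--         if kind == "static":
--             out += names
--         else:
--             out += [p + str(w) for w in ws for p in names]
--     return out
-- ===== Notes on version B (the rewrite author's own statement) =====
-- stated objective: simpler
-- what changed: Replaced A's twelve hand-written loops and extend calls by a single pass over an ordered schema of static / windowed segments, expanding name prefixes over the window sizes.
import Mathlib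
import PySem

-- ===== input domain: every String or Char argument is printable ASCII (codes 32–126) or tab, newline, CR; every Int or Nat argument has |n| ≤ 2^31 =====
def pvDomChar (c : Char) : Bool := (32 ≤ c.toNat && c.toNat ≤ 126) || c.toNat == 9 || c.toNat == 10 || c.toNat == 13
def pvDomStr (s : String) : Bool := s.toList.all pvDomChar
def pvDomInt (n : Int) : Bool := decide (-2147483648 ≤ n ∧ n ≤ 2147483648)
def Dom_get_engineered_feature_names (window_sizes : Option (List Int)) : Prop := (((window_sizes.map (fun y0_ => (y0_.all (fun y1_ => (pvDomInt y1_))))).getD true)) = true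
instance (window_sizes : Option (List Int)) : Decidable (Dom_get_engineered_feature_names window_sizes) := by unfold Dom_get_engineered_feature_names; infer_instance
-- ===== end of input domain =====

-- B replaces A's twelve hand-written loops by a single pass over an ordered schema of
-- static / windowed segments (objective: simpler; same output, return value only).

-- ===== PORT A =====
-- literal transliteration: each 'for w in window_sizes: features.append/extend(…)'
-- is a foldl over the same list appending to the accumulated features list
def get_engineered_feature_names (window_sizes : Option (List Int)) : List String :=
  let ws := match window_sizes with
    | none => [(5 : Int), 10, 15]
    | some l => l
  let features : List String := []
  let features := features ++ ["dev_sold_flag", "dev_sold_cumsum"]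
  let features := ws.foldl (fun acc w => acc ++ ["dev_sold_spike_" ++ PySem.Int.toStr w]) features
  let features := ws.foldl (fun acc w => acc ++ ["buy_pressure_ma_" ++ PySem.Int.toStr w, "buy_pressure_trend_" ++ PySem.Int.toStr w]) features
  let features := features ++ ["whale_net_volume"]
  let features := ws.foldl (fun acc w => acc ++ ["whale_activity_" ++ PySem.Int.toStr w]) features
  let features := ws.foldl (fun acc w => acc ++ ["volatility_ma_" ++ PySem.Int.toStr w, "volatility_spike_" ++ PySem.Int.toStr w]) features
  let features := ws.foldl (fun acc w => acc ++ ["wash_trading_flag_" ++ PySem.Int.toStr w]) features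
  let features := ws.foldl (fun acc w => acc ++ ["net_volume_ma_" ++ PySem.Int.toStr w, "volume_flip_" ++ PySem.Int.toStr w]) features
  let features := ws.foldl (fun acc w => acc ++ ["price_change_" ++ PySem.Int.toStr w, "price_roc_" ++ PySem.Int.toStr w]) features
  let features := ws.foldl (fun acc w => acc ++ ["mcap_velocity_" ++ PySem.Int.toStr w]) features
  let features := ws.foldl (fun acc w => acc ++
    ["ath_distance_trend_" ++ PySem.Int.toStr w, "ath_approach_" ++ PySem.Int.toStr w,
     "ath_breakout_count_" ++ PySem.Int.toStr w, "ath_breakout_volume_ma_" ++ PySem.Int.toStr w,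
     "ath_age_trend_" ++ PySem.Int.toStr w]) features
  let features := features ++ ["rolling_ath", "price_vs_ath_pct", "ath_breakout", "minutes_since_ath"]
  let features := features ++ ["buy_sell_ratio", "whale_dominance"]
  let features := ws.foldl (fun acc w => acc ++ ["price_acceleration_" ++ PySem.Int.toStr w, "volume_spike_" ++ PySem.Int.toStr w]) features
  features

-- ===== PORT B =====
-- a schema segment: a static block of names, or per-window name prefixes
inductive FeatSeg where
  | stat : List String → FeatSeg
  | win : List String → FeatSeg
deriving DecidableEq, Repr

def featSchema : List FeatSeg :=
  [ .stat ["dev_sold_flag", "dev_sold_cumsum"],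
    .win ["dev_sold_spike_"],
    .win ["buy_pressure_ma_", "buy_pressure_trend_"],
    .stat ["whale_net_volume"],
    .win ["whale_activity_"],
    .win ["volatility_ma_", "volatility_spike_"],
    .win ["wash_trading_flag_"],
    .win ["net_volume_ma_", "volume_flip_"],
    .win ["price_change_", "price_roc_"],
    .win ["mcap_velocity_"],
    .win ["ath_distance_trend_", "ath_approach_", "ath_breakout_count_",
          "ath_breakout_volume_ma_", "ath_age_trend_"],
    .stat ["rolling_ath", "price_vs_ath_pct", "ath_breakout", "minutes_since_ath",
           "buy_sell_ratio", "whale_dominance"],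
    .win ["price_acceleration_", "volume_spike_"] ]

def get_engineered_feature_names_alt (window_sizes : Option (List Int)) : List String :=
  let ws := match window_sizes with
    | none => [(5 : Int), 10, 15]
    | some l => l
  featSchema.flatMap fun seg =>
    match seg with
    | .stat names => names
    | .win prefixes => ws.flatMap fun w => prefixes.map (fun p => p ++ PySem.Int.toStr w)

-- ===== PRECONDITION & SPEC =====
def Spec_get_engineered_feature_names (window_sizes : Option (List Int)) (out : List String) : Prop := out = get_engineered_feature_names_alt window_sizes
instance (window_sizes : Option (List Int)) (out : List String) : Decidable (Spec_get_engineered_feature_names window_sizes out) := by unfold Spec_get_engineered_feature_names; infer_instance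

-- ===== CLAIM (what is proved, stated in full; the proofs are below) =====
def Claim_equal_get_engineered_feature_names : Prop := ∀ (window_sizes : Option (List Int)), Dom_get_engineered_feature_names window_sizes → Spec_get_engineered_feature_names window_sizes (get_engineered_feature_names window_sizes)

-- ===== LEMMAS AND PROOFS =====
-- both sides agree for every window list (A's folds become flatMaps, B's schema unfolds)
theorem ports_agree (ws : List Int) :
    get_engineered_feature_names (some ws) = get_engineered_feature_names_alt (some ws) := by
  simp [get_engineered_feature_names, get_engineered_feature_names_alt, featSchema, List.flatMap, List.append_assoc]

-- ===== VERDICT (by name: the statement is the Claim_ definition above) =====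
theorem get_engineered_feature_names_spec : Claim_equal_get_engineered_feature_names := by
  intro ws _
  unfold Spec_get_engineered_feature_names
  cases ws with
  | none =>
      have h := ports_agree [5, 10, 15]
      simpa [get_engineered_feature_names, get_engineered_feature_names_alt] using h
  | some l => exact ports_agree l
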